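-- pv_equiv track=rewrite | github.com/jeffechiu/15112 | week 2/hw2.py | patternedMessage
-- ===== SOURCE A (Python) =====
-- import string
--
-- def patternedMessage(msg, pattern):
--     newMsg = ""
--     counter = 1
--     newPattern= ""
--     for character in msg:
--         if not character in string.whitespace:
--             newMsg += character
--     for letter in pattern:
--         if letter in string.whitespace:
--             newPattern += letter
--         if not letter in string.whitespace:
--             newPattern += newMsg[counter-1:counter]
--             if counter == len(newMsg):
--                 counter = 1
--             else:
--                 counter += 1
--     return newPattern
-- ===== SOURCE B (Python) =====
-- import string
--
-- def patternedMessage(msg, pattern):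
--     ws = string.whitespace
--     clean = ''.join(c for c in msg if c not in ws)
--     # tokenize pattern into maximal runs of same whitespace-class
--     runs = []
--     for c in pattern:
--         if runs and (runs[-1][-1] in ws) == (c in ws):
--             runs[-1] += c
--         else:
--             runs.append(c)
--     # fill each non-space run with a slice of the cyclically repeated clean message
--     out = []
--     off = 0
--     for run in runs:
--         if run[0] in ws:
--             out.append(run)
--         else:
--             k = len(run)
--             if clean:
--                 out.append((clean * ((off + k) // len(clean) + 1))[off:off + k])
--             off += k
--     return ''.join(out)
-- ===== Notes on version B (the rewrite author's own statement) =====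
-- stated objective: alternative
-- what changed: B tokenizes the pattern into maximal whitespace/non-whitespace runs and fills each non-space run with one slice of the cyclically repeated cleaned message, instead of A's single character loop that threads a 1-based reset counter and slices the cleaned message per character.
import Mathlib
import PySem

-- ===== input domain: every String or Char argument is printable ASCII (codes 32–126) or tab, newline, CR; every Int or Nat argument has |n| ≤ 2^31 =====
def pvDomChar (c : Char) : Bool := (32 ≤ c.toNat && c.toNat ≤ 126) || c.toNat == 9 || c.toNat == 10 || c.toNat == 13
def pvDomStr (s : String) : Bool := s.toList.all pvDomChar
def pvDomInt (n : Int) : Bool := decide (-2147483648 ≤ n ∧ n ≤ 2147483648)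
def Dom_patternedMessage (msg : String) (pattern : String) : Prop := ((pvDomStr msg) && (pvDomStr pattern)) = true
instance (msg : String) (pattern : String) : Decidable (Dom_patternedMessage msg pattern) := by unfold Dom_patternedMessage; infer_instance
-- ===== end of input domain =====

-- B tokenizes the pattern into maximal whitespace/non-whitespace runs and fills each
-- non-space run with one slice of the cyclically repeated cleaned message, instead of A's
-- per-character loop threading a 1-based reset counter; objective: alternative (no speed claim).

-- membership test `c in string.whitespace` (string.whitespace = ' \t\n\r\x0b\x0c'), used by both ports
def pmIsWS (c : Char) : Bool :=
  c == ' ' || c == '\t' || c == '\n' || c == '\r' || c == Char.ofNat 11 || c == Char.ofNat 12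

-- ===== PORT A =====
-- loop body of A's second for-loop: state = (newPattern, counter); counter is a Python int
def pmStepA (newMsg : List Char) (st : List Char × Int) (letter : Char) : List Char × Int :=
  let st1 := if pmIsWS letter then (st.1 ++ [letter], st.2) else st
  if !pmIsWS letter then
    let np := st1.1 ++ PySem.List.slice newMsg (some (st1.2 - 1)) (some st1.2)
    if st1.2 = (newMsg.length : Int) then (np, 1) else (np, st1.2 + 1)
  else st1

def patternedMessage (msg : String) (pattern : String) : String :=
  let newMsg := msg.toList.foldl (fun acc c => if !pmIsWS c then acc ++ [c] else acc) []
  String.ofList (pattern.toList.foldl (pmStepA newMsg) ([], 1)).1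

-- ===== PORT B =====
-- B's tokenizer step: merge c into the last run if same whitespace-class, else start a new run
def pmAddRun (runs : List (List Char)) (c : Char) : List (List Char) :=
  match runs.getLast? with
  | some r => if pmIsWS r.getLast! == pmIsWS c
              then runs.dropLast ++ [r ++ [c]]
              else runs ++ [[c]]
  | none => [[c]]

-- (clean * ((off+k)//len(clean) + 1))[off:off+k] with nonnegative indices = drop off, take k
def pmPiece (clean : List Char) (off k : Nat) : List Char :=
  ((List.replicate ((off + k) / clean.length + 1) clean).flatten.drop off).take k

-- B's fill loop body: state = (out, off)
def pmRunStep (clean : List Char) (st : List Char × Nat) (run : List Char) : List Char × Nat :=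
  if pmIsWS run.head! then (st.1 ++ run, st.2)
  else (st.1 ++ (if clean.isEmpty then [] else pmPiece clean st.2 run.length),
        st.2 + run.length)

def patternedMessage_alt (msg : String) (pattern : String) : String :=
  let clean := msg.toList.filter (fun c => !pmIsWS c)
  String.ofList ((pattern.toList.foldl pmAddRun []).foldl (pmRunStep clean) ([], 0)).1

-- ===== PRECONDITION & SPEC =====
def Spec_patternedMessage (msg : String) (pattern : String) (out : String) : Prop := out = patternedMessage_alt msg pattern
instance (msg : String) (pattern : String) (out : String) : Decidable (Spec_patternedMessage msg pattern out) := by unfold Spec_patternedMessage; infer_instance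

-- ===== CLAIM (what is proved, stated in full; the proofs are below) =====
def Claim_equal_patternedMessage : Prop := ∀ (msg : String) (pattern : String), Dom_patternedMessage msg pattern → Spec_patternedMessage msg pattern (patternedMessage msg pattern)

-- ===== LEMMAS AND PROOFS =====

-- step reductions for A's loop body
theorem pmStepA_ws (m out : List Char) (cnt : Int) (c : Char) (h : pmIsWS c = true) :
    pmStepA m (out, cnt) c = (out ++ [c], cnt) := by simp [pmStepA, h]

theorem pmStepA_nws (m out : List Char) (cnt : Int) (c : Char) (h : pmIsWS c = false) :
    pmStepA m (out, cnt) c =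
      (if cnt = (m.length : Int)
       then (out ++ PySem.List.slice m (some (cnt - 1)) (some cnt), 1)
       else (out ++ PySem.List.slice m (some (cnt - 1)) (some cnt), cnt + 1)) := by
  simp [pmStepA, h]

-- grouping correctness: the runs cover the input and each run is nonempty and homogeneous
theorem pmAddRun_flatten (runs : List (List Char)) (c : Char) :
    (pmAddRun runs c).flatten = runs.flatten ++ [c] := by
  cases hr : runs.getLast? with
  | none =>
    rw [List.getLast?_eq_none_iff.mp hr]
    simp [pmAddRun]
  | some r =>
    obtain ⟨l', rfl⟩ := List.getLast?_eq_some_iff.mp hr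
    simp only [pmAddRun, hr]
    split <;> simp

theorem pmAddRun_inv (runs : List (List Char)) (c : Char)
    (h : ∀ r ∈ runs, r ≠ [] ∧ ∃ b, ∀ x ∈ r, pmIsWS x = b) :
    ∀ r ∈ pmAddRun runs c, r ≠ [] ∧ ∃ b, ∀ x ∈ r, pmIsWS x = b := by
  cases hr : runs.getLast? with
  | none =>
    intro r' hr'
    simp [pmAddRun, hr] at hr'
    subst hr'
    exact ⟨by simp, pmIsWS c, by simp⟩
  | some r =>
    obtain ⟨l', rfl⟩ := List.getLast?_eq_some_iff.mp hr
    obtain ⟨hne, b, hb⟩ := h r (by simp)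
    have hlast : r.getLast! = r.getLast hne :=
      List.getLast!_of_getLast? (List.getLast?_eq_some_getLast hne)
    have hlb : pmIsWS r.getLast! = b := by rw [hlast]; exact hb _ (List.getLast_mem hne)
    simp only [pmAddRun, hr]
    split
    · rename_i hcond
      have hcb : pmIsWS c = b := by
        have := beq_iff_eq.mp hcond
        rw [hlb] at this; exact this.symm
      intro r' hr'
      rw [List.dropLast_concat] at hr'
      rcases List.mem_append.mp hr' with hmem | hmem
      · exact h r' (by simp [hmem])
      · simp at hmem
        subst hmem
        refine ⟨by simp, b, ?_⟩
        intro x hx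
        rcases List.mem_append.mp hx with hx | hx
        · exact hb x hx
        · simp at hx; subst hx; exact hcb
    · intro r' hr'
      rcases List.mem_append.mp hr' with hmem | hmem
      · exact h r' hmem
      · simp at hmem
        subst hmem
        exact ⟨by simp, pmIsWS c, by simp⟩

theorem pmRuns_spec (cs : List Char) (runs0 : List (List Char))
    (h0 : ∀ r ∈ runs0, r ≠ [] ∧ ∃ b, ∀ x ∈ r, pmIsWS x = b) :
    (cs.foldl pmAddRun runs0).flatten = runs0.flatten ++ cs ∧
    ∀ r ∈ cs.foldl pmAddRun runs0, r ≠ [] ∧ ∃ b, ∀ x ∈ r, pmIsWS x = b := by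
  induction cs generalizing runs0 with
  | nil => simpa using h0
  | cons c cs ih =>
    have h1 := pmAddRun_inv runs0 c h0
    have ⟨hf, hi⟩ := ih (pmAddRun runs0 c) h1
    refine ⟨?_, hi⟩
    rw [List.foldl_cons] at *
    rw [hf, pmAddRun_flatten]
    simp

-- cyclic repetition lemmas
theorem pm_flatten_replicate_getElem (clean : List Char) (k i : Nat)
    (hL : 0 < clean.length)
    (h : i < ((List.replicate k clean).flatten).length) :
    ((List.replicate k clean).flatten)[i] = clean[i % clean.length]'(Nat.mod_lt i hL) := by
  induction k generalizing i with
  | zero => simp at h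
  | succ k ih =>
    simp only [List.replicate_succ, List.flatten_cons] at h ⊢
    by_cases hlt : i < clean.length
    · rw [List.getElem_append_left hlt]
      congr 1
      exact (Nat.mod_eq_of_lt hlt).symm
    · have hlen : clean.length ≤ i := by omega
      rw [List.getElem_append_right hlen]
      rw [ih (i - clean.length) (by simp at h ⊢; omega)]
      congr 1
      conv_rhs => rw [show i = (i - clean.length) + clean.length from by omega]
      rw [Nat.add_mod_right]

theorem pm_rep_len (clean : List Char) (t : Nat) :
    ((List.replicate t clean).flatten).length = t * clean.length := by
  simp [List.length_flatten, List.map_replicate, List.sum_replicate]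

theorem pmPiece_zero (clean : List Char) (off : Nat) : pmPiece clean off 0 = [] := by
  simp [pmPiece]

theorem pmPiece_cons (clean : List Char) (off k : Nat) (hL : 0 < clean.length) :
    pmPiece clean off (k + 1)
      = clean[off % clean.length]'(Nat.mod_lt off hL) :: pmPiece clean (off + 1) k := by
  unfold pmPiece
  rw [show off + (k + 1) = off + 1 + k from by omega]
  have hoff : off < ((List.replicate ((off + 1 + k) / clean.length + 1) clean).flatten).length := by
    rw [pm_rep_len]
    have h1 := Nat.div_add_mod (off + 1 + k) clean.length
    have h2 := Nat.mod_lt (off + 1 + k) hL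
    have h4 : off + 1 + k < ((off + 1 + k) / clean.length + 1) * clean.length := by
      calc off + 1 + k < clean.length * ((off + 1 + k) / clean.length) + clean.length := by omega
        _ = ((off + 1 + k) / clean.length + 1) * clean.length := by ring
    omega
  rw [List.drop_eq_getElem_cons hoff, List.take_succ_cons,
      pm_flatten_replicate_getElem _ _ _ hL hoff]

-- the one-character slice A appends is [clean[i % L]]
theorem pm_piece_A (clean : List Char) (i : Nat) (hL : 0 < clean.length) :
    PySem.List.slice clean (some (((i % clean.length : Nat) : Int) + 1 - 1)) (some (((i % clean.length : Nat) : Int) + 1))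
      = [clean[i % clean.length]'(Nat.mod_lt i hL)] := by
  have h1 : ((i % clean.length : Nat) : Int) + 1 - 1 = ((i % clean.length : Nat) : Int) := by ring
  have h2 : ((i % clean.length : Nat) : Int) + 1 = (((i % clean.length + 1 : Nat)) : Int) := by
    push_cast; ring
  rw [h1, h2, PySem.List.slice_natCast]
  have h3 : i % clean.length + 1 - i % clean.length = 1 := by omega
  rw [h3, List.drop_eq_getElem_cons (Nat.mod_lt i hL), List.take_succ_cons, List.take_zero]

-- A's loop over a run of whitespace characters copies it and keeps the counter
theorem pm_runA_ws (clean : List Char) (r : List Char) (hws : ∀ x ∈ r, pmIsWS x = true)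
    (out : List Char) (cnt : Int) :
    r.foldl (pmStepA clean) (out, cnt) = (out ++ r, cnt) := by
  induction r generalizing out with
  | nil => simp
  | cons c r ih =>
    rw [List.foldl_cons, pmStepA_ws _ _ _ _ (hws c (by simp))]
    rw [ih (fun x hx => hws x (by simp [hx]))]
    simp

-- A's loop over a run of k non-space characters appends the cyclic slice and advances mod L
theorem pm_runA_nws (clean : List Char) (hL : 0 < clean.length)
    (r : List Char) (hws : ∀ x ∈ r, pmIsWS x = false) (out : List Char) (off : Nat) :
    r.foldl (pmStepA clean) (out, ((off % clean.length : Nat) : Int) + 1)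
      = (out ++ pmPiece clean off r.length, (((off + r.length) % clean.length : Nat) : Int) + 1) := by
  induction r generalizing out off with
  | nil => simp [pmPiece_zero]
  | cons c r ih =>
    have hc : pmIsWS c = false := hws c (by simp)
    have hws' : ∀ x ∈ r, pmIsWS x = false := fun x hx => hws x (by simp [hx])
    rw [List.foldl_cons, pmStepA_nws _ _ _ _ hc, pm_piece_A clean off hL]
    have hcnt : (if ((off % clean.length : Nat) : Int) + 1 = (clean.length : Int)
          then (out ++ [clean[off % clean.length]'(Nat.mod_lt off hL)], (1 : Int))
          else (out ++ [clean[off % clean.length]'(Nat.mod_lt off hL)],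
                ((off % clean.length : Nat) : Int) + 1 + 1))
        = (out ++ [clean[off % clean.length]'(Nat.mod_lt off hL)],
           (((off + 1) % clean.length : Nat) : Int) + 1) := by
      split
      · rename_i hcase
        have hmodL : off % clean.length + 1 = clean.length := by exact_mod_cast hcase
        have hmod : (off + 1) % clean.length = 0 := by
          conv_lhs => rw [show off + 1 = (off % clean.length + 1) + clean.length * (off / clean.length) from by
            have := Nat.mod_add_div off clean.length; omega]
          rw [Nat.add_mul_mod_self_left, hmodL, Nat.mod_self]
        rw [hmod]; simp
      · rename_i hcase
        have hlt : off % clean.length < clean.length := Nat.mod_lt off hL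
        have hne : off % clean.length + 1 ≠ clean.length := by
          intro h; exact hcase (by exact_mod_cast congrArg (fun m : Nat => (m : Int)) h)
        have hmod : (off + 1) % clean.length = off % clean.length + 1 := by
          conv_lhs => rw [show off + 1 = (off % clean.length + 1) + clean.length * (off / clean.length) from by
            have := Nat.mod_add_div off clean.length; omega]
          rw [Nat.add_mul_mod_self_left, Nat.mod_eq_of_lt (by omega)]
        rw [hmod]; push_cast; ring_nf
    rw [hcnt, ih hws']
    rw [List.length_cons, pmPiece_cons clean off r.length hL,
        show off + (r.length + 1) = off + 1 + r.length from by omega]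
    simp

-- empty clean: A's loop keeps exactly the whitespace characters
theorem pm_A_empty (ps : List Char) (out : List Char) (cnt : Int) :
    (ps.foldl (pmStepA []) (out, cnt)).1 = out ++ ps.filter pmIsWS := by
  induction ps generalizing out cnt with
  | nil => simp
  | cons c ps ih =>
    rw [List.foldl_cons]
    cases hws : pmIsWS c
    · rw [pmStepA_nws _ _ _ _ hws]
      have hsl : PySem.List.slice ([] : List Char) (some (cnt - 1)) (some cnt) = [] := by
        simp [PySem.List.slice]
      split <;> rw [hsl] <;> simp [ih, hws]
    · rw [pmStepA_ws _ _ _ _ hws]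
      simp [ih, hws]

-- empty clean: B's run loop keeps exactly the whitespace characters
theorem pm_B_empty (runs : List (List Char))
    (hinv : ∀ r ∈ runs, r ≠ [] ∧ ∃ b, ∀ x ∈ r, pmIsWS x = b) (out : List Char) (off : Nat) :
    (runs.foldl (pmRunStep []) (out, off)).1 = out ++ runs.flatten.filter pmIsWS := by
  induction runs generalizing out off with
  | nil => simp
  | cons r rs ih =>
    obtain ⟨hne, b, hb⟩ := hinv r (by simp)
    obtain ⟨x, xs, rfl⟩ := List.exists_cons_of_ne_nil hne
    have hx := hb x (by simp)
    have hinv' : ∀ r ∈ rs, r ≠ [] ∧ ∃ b, ∀ x ∈ r, pmIsWS x = b := fun r hr => hinv r (by simp [hr])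
    rw [List.foldl_cons]
    cases b with
    | true =>
      have hfil : (x :: xs).filter pmIsWS = x :: xs := List.filter_eq_self.mpr hb
      rw [show pmRunStep [] (out, off) (x :: xs) = (out ++ (x :: xs), off) from by
        simp [pmRunStep, hx]]
      rw [ih hinv', List.flatten_cons, List.filter_append, hfil, List.append_assoc]
    | false =>
      have hfil : (x :: xs).filter pmIsWS = [] := by
        rw [List.filter_eq_nil_iff]
        intro a ha
        simp [hb a ha]
      rw [show pmRunStep [] (out, off) (x :: xs) = (out, off + (x :: xs).length) from by
        simp [pmRunStep, hx]]
      rw [ih hinv', List.flatten_cons, List.filter_append, hfil, List.nil_append]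

-- main invariant for L > 0: run-by-run agreement
theorem pm_main_pos (clean : List Char) (hL : 0 < clean.length) (runs : List (List Char))
    (hinv : ∀ r ∈ runs, r ≠ [] ∧ ∃ b, ∀ x ∈ r, pmIsWS x = b) (out : List Char) (off : Nat) :
    (runs.flatten.foldl (pmStepA clean) (out, ((off % clean.length : Nat) : Int) + 1)).1
      = (runs.foldl (pmRunStep clean) (out, off)).1 := by
  induction runs generalizing out off with
  | nil => simp
  | cons r rs ih =>
    obtain ⟨hne, b, hb⟩ := hinv r (by simp)
    obtain ⟨x, xs, rfl⟩ := List.exists_cons_of_ne_nil hne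
    have hx := hb x (by simp)
    have hinv' : ∀ r ∈ rs, r ≠ [] ∧ ∃ b, ∀ x ∈ r, pmIsWS x = b := fun r hr => hinv r (by simp [hr])
    rw [List.flatten_cons, List.foldl_append]
    cases b with
    | true =>
      rw [pm_runA_ws clean (x :: xs) hb out]
      rw [List.foldl_cons, show pmRunStep clean (out, off) (x :: xs) = (out ++ (x :: xs), off) from by
        simp [pmRunStep, hx]]
      exact ih hinv' _ _
    | false =>
      rw [pm_runA_nws clean hL (x :: xs) hb out off]
      have hnemp : clean.isEmpty = false := by
        cases clean with
        | nil => simp at hL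
        | cons a l => rfl
      rw [List.foldl_cons, show pmRunStep clean (out, off) (x :: xs)
          = (out ++ pmPiece clean off (x :: xs).length, off + (x :: xs).length) from by
        simp [pmRunStep, hx, hnemp]]
      exact ih hinv' _ _

-- ===== VERDICT (by name: the statement is the Claim_ definition above) =====
theorem patternedMessage_spec : Claim_equal_patternedMessage := by
  intro msg pattern _
  unfold Spec_patternedMessage patternedMessage patternedMessage_alt
  dsimp only
  have hbuild : msg.toList.foldl (fun acc c => if !pmIsWS c then acc ++ [c] else acc) []
      = msg.toList.filter (fun c => !pmIsWS c) := by
    simpa using PySem.List.foldl_append_if (fun c => !pmIsWS c) id msg.toList []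
  rw [hbuild]
  have ⟨hflat, hinv⟩ := pmRuns_spec pattern.toList [] (by simp)
  by_cases hemp : (msg.toList.filter (fun c => !pmIsWS c)) = []
  · rw [hemp]
    apply congrArg String.ofList
    rw [pm_A_empty, pm_B_empty _ hinv, hflat]
    simp
  · have hL : 0 < (msg.toList.filter (fun c => !pmIsWS c)).length :=
      List.length_pos_iff.mpr hemp
    apply congrArg String.ofList
    have h0 : (1 : Int) = ((0 % (msg.toList.filter (fun c => !pmIsWS c)).length : Nat) : Int) + 1 := by
      simp
    rw [h0]
    have hflat' : (pattern.toList.foldl pmAddRun []).flatten = pattern.toList := by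
      simpa using hflat
    conv_lhs => rw [← hflat']
    exact pm_main_pos _ hL _ hinv [] 0
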